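-- pv_equiv track=rewrite | github.com/drunkpig/fearquantlib | fearquantlib/wavelib.py | __max_successive_series_len
-- ===== SOURCE A (Python) =====
-- def __max_successive_series_len(arr):
--     """
--     寻找最大连续子序列，子序列的下标必须是相连的
--     例如， 1,2,3 返回3
--     Parameters
--     ----------
--     arr
--
--     Returns
--     -------
--
--     """
--     max_area_len = 0
--     for i in range(len(arr)):
--         for j in range(i + 1, len(arr)):
--             if arr[j] < arr[j - 1]:
--                 max_area_len = max(j - i + 1, max_area_len)
--             else:
--                 i = j
--
--     return max_area_len
-- ===== SOURCE B (Python) =====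
-- def __max_successive_series_len(arr):
--     best = 0
--     cur = 0
--     for prev, x in zip(arr, arr[1:]):
--         if x < prev:
--             cur += 1
--             if cur + 1 > best:
--                 best = cur + 1
--         else:
--             cur = 0
--     return best
-- ===== Notes on version B (the rewrite author's own statement) =====
-- stated objective: faster
-- what changed: Replaces the quadratic nested index loops (with the rebound inner i) by one index-free pass over zip(arr, arr[1:]) that counts consecutive descents and keeps the running maximum.
import Mathlib
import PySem

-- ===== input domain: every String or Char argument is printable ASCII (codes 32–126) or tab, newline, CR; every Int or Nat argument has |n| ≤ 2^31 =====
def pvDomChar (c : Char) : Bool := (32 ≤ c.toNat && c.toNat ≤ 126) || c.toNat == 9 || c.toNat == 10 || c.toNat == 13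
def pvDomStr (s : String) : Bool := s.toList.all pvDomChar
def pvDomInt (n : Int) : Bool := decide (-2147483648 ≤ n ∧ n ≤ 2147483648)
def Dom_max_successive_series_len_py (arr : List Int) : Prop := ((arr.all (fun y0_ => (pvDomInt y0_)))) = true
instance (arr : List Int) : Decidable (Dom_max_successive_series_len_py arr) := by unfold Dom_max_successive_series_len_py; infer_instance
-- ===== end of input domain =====

-- B replaces A's quadratic nested index loops by one index-free linear pass over
-- the adjacent pairs zip(arr, arr[1:]); same return value on every input.

-- ===== PORT A =====
-- literal transliteration of A's nested loops; the inner loop carries the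
-- rebindable variable i in its state (Python's 'i = j' in the else branch)
def max_successive_series_len_py (arr : List Int) : Int :=
  (PySem.List.pyRange 0 arr.length 1).foldl
    (fun m i0 =>
      ((PySem.List.pyRange (i0 + 1) arr.length 1).foldl
        (fun (s : Int × Int) j =>
          if PySem.List.pyGetD arr j 0 < PySem.List.pyGetD arr (j - 1) 0 then
            (max (j - s.2 + 1) s.1, s.2)
          else
            (s.1, j))
        (m, i0)).1)
    0

-- ===== PORT B =====
-- the loop 'for prev, x in zip(arr, arr[1:])' with accumulators (best, cur),
-- written as structural recursion over the pair list
def pvAltGo (best cur : Int) : List (Int × Int) → Int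
  | [] => best
  | p :: rest =>
      if p.2 < p.1 then
        pvAltGo (if cur + 1 + 1 > best then cur + 1 + 1 else best) (cur + 1) rest
      else
        pvAltGo best 0 rest

def max_successive_series_len_py_alt (arr : List Int) : Int :=
  pvAltGo 0 0 (arr.zip arr.tail)

-- ===== PRECONDITION & SPEC =====
def Spec_max_successive_series_len_py (arr : List Int) (out : Int) : Prop := out = max_successive_series_len_py_alt arr
instance (arr : List Int) (out : Int) : Decidable (Spec_max_successive_series_len_py arr out) := by unfold Spec_max_successive_series_len_py; infer_instance

-- ===== CLAIM (what is proved, stated in full; the proofs are below) =====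
def Claim_equal_max_successive_series_len_py : Prop := ∀ (arr : List Int), Dom_max_successive_series_len_py arr → Spec_max_successive_series_len_py arr (max_successive_series_len_py arr)

-- ===== LEMMAS AND PROOFS =====

-- descent at position k+1: arr[k+1] < arr[k]
abbrev pvDesc (arr : List Int) (k : ℕ) : Prop := arr.getD (k + 1) 0 < arr.getD k 0

-- length of the maximal descent streak ending at position j
def pvStreak (arr : List Int) : ℕ → ℕ
  | 0 => 0
  | j + 1 => if pvDesc arr j then pvStreak arr j + 1 else 0

-- best (run length ≥ 2, else 0) over the prefix ending at position j
def pvM (arr : List Int) : ℕ → ℕ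
  | 0 => 0
  | j + 1 => if pvDesc arr j then max (pvM arr j) (pvStreak arr (j + 1) + 1) else pvM arr j

-- A's inner-loop variable i after processing j = i0 + t
def pvI (arr : List Int) (i0 : ℕ) : ℕ → ℕ
  | 0 => i0
  | t + 1 => if pvDesc arr (i0 + t) then pvI arr i0 t else i0 + t + 1

-- A's inner-loop accumulator after processing j = i0 + t, started at m
def pvC (arr : List Int) (i0 m : ℕ) : ℕ → ℕ
  | 0 => m
  | t + 1 => if pvDesc arr (i0 + t) then max (i0 + t + 1 - pvI arr i0 t + 1) (pvC arr i0 m t) else pvC arr i0 m t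

theorem pvStreak_le (arr : List Int) : ∀ j, pvStreak arr j ≤ j := by
  intro j; induction j with
  | zero => simp [pvStreak]
  | succ j ih => simp only [pvStreak]; split <;> omega

theorem pvI_eq (arr : List Int) (i0 : ℕ) : ∀ t, pvI arr i0 t = max i0 (i0 + t - pvStreak arr (i0 + t)) := by
  intro t; induction t with
  | zero => simp [pvI]
  | succ t ih =>
    show pvI arr i0 (t + 1) = max i0 (i0 + t + 1 - pvStreak arr (i0 + t + 1))
    simp only [pvI, pvStreak]
    by_cases h : pvDesc arr (i0 + t)
    · simp only [if_pos h]; omega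
    · simp only [if_neg h]; omega

theorem pvC_zero_eq (arr : List Int) : ∀ t, pvC arr 0 0 t = pvM arr t := by
  intro t; induction t with
  | zero => rfl
  | succ t ih =>
    have hs := pvStreak_le arr t
    have hI := pvI_eq arr 0 t
    show pvC arr 0 0 (t + 1) = pvM arr (t + 1)
    simp only [pvC, pvM, pvStreak, Nat.zero_add] at *
    by_cases h : pvDesc arr t
    · simp only [if_pos h]; omega
    · simp only [if_neg h]; exact ih

theorem pvC_ge (arr : List Int) (i0 m : ℕ) : ∀ t, m ≤ pvC arr i0 m t := by
  intro t; induction t with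
  | zero => simp [pvC]
  | succ t ih => simp only [pvC]; split <;> omega

theorem pvC_le (arr : List Int) (i0 m : ℕ) : ∀ t, pvC arr i0 m t ≤ max m (pvM arr (i0 + t)) := by
  intro t; induction t with
  | zero => simp [pvC]
  | succ t ih =>
    have hs := pvStreak_le arr (i0 + t)
    have hI := pvI_eq arr i0 t
    show pvC arr i0 m (t + 1) ≤ max m (pvM arr (i0 + t + 1))
    simp only [pvC, pvM, pvStreak]
    by_cases h : pvDesc arr (i0 + t)
    · simp only [if_pos h]; omega
    · simp only [if_neg h]; omega

theorem pvC_fixed (arr : List Int) (i0 m t : ℕ) (h : pvM arr (i0 + t) ≤ m) : pvC arr i0 m t = m :=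
  le_antisymm (le_trans (pvC_le arr i0 m t) (by omega)) (pvC_ge arr i0 m t)

-- the test in port A, at index (k+1 : ℕ), is pvDesc arr k
theorem pvTest_eq (arr : List Int) (k : ℕ) :
    (PySem.List.pyGetD arr ((k : Int) + 1) 0 < PySem.List.pyGetD arr ((k : Int) + 1 - 1) 0) ↔ pvDesc arr k := by
  have h1 : ((k : Int) + 1) = ((k + 1 : ℕ) : Int) := by push_cast; ring
  have h2 : ((k : Int) + 1 - 1) = ((k : ℕ) : Int) := by ring
  rw [h2, h1, PySem.List.pyGetD_natCast, PySem.List.pyGetD_natCast]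

-- the inner fold of A, started at (m, i0) and run up to j = i0 + t
theorem innerA (arr : List Int) (i0 m : ℕ) : ∀ t : ℕ,
    (PySem.List.pyRange ((i0 : Int) + 1) ((i0 : Int) + (t : Int) + 1) 1).foldl
      (fun (s : Int × Int) j =>
        if PySem.List.pyGetD arr j 0 < PySem.List.pyGetD arr (j - 1) 0 then
          (max (j - s.2 + 1) s.1, s.2)
        else
          (s.1, j))
      ((m : Int), (i0 : Int))
    = (((pvC arr i0 m t : ℕ) : Int), ((pvI arr i0 t : ℕ) : Int)) := by
  intro t; induction t with
  | zero =>
    rw [show ((i0 : Int) + ((0 : ℕ) : Int) + 1) = (i0 : Int) + 1 by push_cast; ring,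
        PySem.List.pyRange_one_eq_nil (le_refl _)]
    simp [pvC, pvI]
  | succ t ih =>
    rw [show ((i0 : Int) + ((t + 1 : ℕ) : Int) + 1) = ((i0 : Int) + (t : Int) + 1) + 1 by push_cast; ring,
        PySem.List.pyRange_one_succ_right (by omega), List.foldl_append, ih]
    simp only [List.foldl_cons, List.foldl_nil]
    rw [show ((i0 : Int) + (t : Int)) = ((i0 + t : ℕ) : Int) by push_cast; ring]
    by_cases h : pvDesc arr (i0 + t)
    · rw [if_pos ((pvTest_eq arr (i0 + t)).mpr h)]
      have hI := pvI_eq arr i0 t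
      have hs := pvStreak_le arr (i0 + t)
      simp only [pvC, pvI, if_pos h, Prod.mk.injEq]
      exact ⟨by omega, trivial⟩
    · rw [if_neg (fun hh => h ((pvTest_eq arr (i0 + t)).mp hh))]
      simp only [pvC, pvI, if_neg h, Prod.mk.injEq]
      exact ⟨trivial, by push_cast; omega⟩

-- B's scan over the remaining adjacent pairs, started from the state after position t
theorem altGo_eq (arr : List Int) (hn : 1 ≤ arr.length) : ∀ d t, t + d = arr.length - 1 →
    pvAltGo ((pvM arr t : ℕ) : Int) ((pvStreak arr t : ℕ) : Int) ((arr.zip arr.tail).drop t)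
      = ((pvM arr (arr.length - 1) : ℕ) : Int) := by
  have hz : (arr.zip arr.tail).length = arr.length - 1 := by
    rw [List.length_zip, List.length_tail]; omega
  intro d; induction d with
  | zero =>
    intro t ht
    have het : t = arr.length - 1 := by omega
    subst het
    rw [List.drop_eq_nil_of_le (by omega)]
    rfl
  | succ d ih =>
    intro t ht
    have htl : t < (arr.zip arr.tail).length := by omega
    rw [List.drop_eq_getElem_cons htl]
    have h1 : t < arr.length := by omega
    have h2 : t + 1 < arr.length := by omega
    have hpair : (arr.zip arr.tail)[t] = (arr.getD t 0, arr.getD (t + 1) 0) := by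
      rw [List.getElem_zip]
      rw [List.getD_eq_getElem arr 0 h1, List.getD_eq_getElem arr 0 h2]
      congr 1
      rw [List.getElem_tail]
    rw [hpair]
    simp only [pvAltGo]
    by_cases h : pvDesc arr t
    · rw [if_pos h]
      have hM : pvM arr (t + 1) = max (pvM arr t) (pvStreak arr (t + 1) + 1) := by
        rw [pvM, if_pos h]
      have hS : pvStreak arr (t + 1) = pvStreak arr t + 1 := by
        rw [pvStreak, if_pos h]
      have hgoal := ih (t + 1) (by omega)
      rw [hS] at hgoal
      rw [show ((pvStreak arr t : ℕ) : Int) + 1 = ((pvStreak arr t + 1 : ℕ) : Int) by push_cast; ring] at *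
      rw [show (if ((pvStreak arr t + 1 : ℕ) : Int) + 1 > ((pvM arr t : ℕ) : Int) then ((pvStreak arr t + 1 : ℕ) : Int) + 1 else ((pvM arr t : ℕ) : Int)) = ((pvM arr (t + 1) : ℕ) : Int) by
        rw [hM, hS]; split_ifs <;> push_cast <;> omega]
      exact hgoal
    · rw [if_neg (by simpa [pvDesc] using h)]
      have hM : pvM arr (t + 1) = pvM arr t := by rw [pvM, if_neg h]
      have hS : pvStreak arr (t + 1) = 0 := by rw [pvStreak, if_neg h]
      have hgoal := ih (t + 1) (by omega)
      rw [hM, hS] at hgoal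
      simpa using hgoal

-- the tail of A's outer loop no longer changes the accumulator
theorem outerA_tail (arr : List Int) (v : ℕ) : ∀ (l : List Int),
    (∀ i0 ∈ l, 1 ≤ i0 ∧ i0 < (arr.length : Int)) →
    (pvM arr (arr.length - 1) ≤ v) →
    l.foldl
      (fun m i0 =>
        ((PySem.List.pyRange (i0 + 1) (arr.length : Int) 1).foldl
          (fun (s : Int × Int) j =>
            if PySem.List.pyGetD arr j 0 < PySem.List.pyGetD arr (j - 1) 0 then
              (max (j - s.2 + 1) s.1, s.2)
            else
              (s.1, j))
          (m, i0)).1)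
      ((v : Int))
    = (v : Int) := by
  intro l
  induction l with
  | nil => intro _ _; rfl
  | cons i0 rest ih =>
    intro hb hv
    obtain ⟨h1, h2⟩ := hb i0 (List.mem_cons_self ..)
    have hk : i0 = ((i0.toNat : ℕ) : Int) := (Int.toNat_of_nonneg (by omega)).symm
    have hlen : i0.toNat < arr.length := by omega
    have hstep : ((PySem.List.pyRange (i0 + 1) (arr.length : Int) 1).foldl
          (fun (s : Int × Int) j =>
            if PySem.List.pyGetD arr j 0 < PySem.List.pyGetD arr (j - 1) 0 then
              (max (j - s.2 + 1) s.1, s.2)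
            else
              (s.1, j))
          ((v : Int), i0)).1 = (v : Int) := by
      rw [hk, show (arr.length : Int) = ((i0.toNat : ℕ) : Int) + ((arr.length - 1 - i0.toNat : ℕ) : Int) + 1 from by omega,
          innerA arr i0.toNat v (arr.length - 1 - i0.toNat)]
      rw [pvC_fixed arr i0.toNat v _ (by rw [show i0.toNat + (arr.length - 1 - i0.toNat) = arr.length - 1 from by omega]; exact hv)]
    simp only [List.foldl_cons, hstep]
    exact ih (fun x hx => hb x (List.mem_cons_of_mem _ hx)) hv

-- ===== VERDICT (by name: the statement is the Claim_ definition above) =====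
theorem max_successive_series_len_py_spec : Claim_equal_max_successive_series_len_py := by
  intro arr _
  unfold Spec_max_successive_series_len_py max_successive_series_len_py max_successive_series_len_py_alt
  rcases Nat.eq_zero_or_pos arr.length with h0 | hpos
  · rw [show ((arr.length : Int)) = 0 by omega, PySem.List.pyRange_one_eq_nil (by norm_num)]
    rw [List.eq_nil_of_length_eq_zero h0]
    rfl
  · -- B's side: the full scan computes pvM (n-1)
    have hB := altGo_eq arr hpos (arr.length - 1) 0 (by omega)
    simp only [pvM, pvStreak, List.drop_zero, Nat.cast_zero] at hB
    rw [hB]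
    -- A's side: peel off i0 = 0
    rw [PySem.List.pyRange_one_cons (by exact_mod_cast hpos), List.foldl_cons]
    have hfirst : ((PySem.List.pyRange ((0 : Int) + 1) (arr.length : Int) 1).foldl
          (fun (s : Int × Int) j =>
            if PySem.List.pyGetD arr j 0 < PySem.List.pyGetD arr (j - 1) 0 then
              (max (j - s.2 + 1) s.1, s.2)
            else
              (s.1, j))
          ((0 : Int), (0 : Int))).1 = ((pvM arr (arr.length - 1) : ℕ) : Int) := by
      have hA := innerA arr 0 0 (arr.length - 1)
      rw [show (((0 : ℕ) : Int) + 1) = ((0 : Int) + 1) by norm_num,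
          show (((0 : ℕ) : Int) + ((arr.length - 1 : ℕ) : Int) + 1) = (arr.length : Int) from by omega,
          show (((0 : ℕ) : Int), ((0 : ℕ) : Int)) = ((0 : Int), (0 : Int)) by norm_num] at hA
      rw [hA, pvC_zero_eq arr (arr.length - 1)]
    rw [hfirst]
    exact outerA_tail arr (pvM arr (arr.length - 1)) (PySem.List.pyRange 1 (arr.length : Int) 1)
      (fun i0 hi => PySem.List.mem_pyRange_one.mp hi) (le_refl _)
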